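-- pv_equiv track=rewrite | github.com/roeeshahmoon/InterCyberArk | InterCyber_Two.py | count_castles
-- ===== SOURCE A (Python) =====
-- def is_hill_or_valley(P, Q, A: []):
--     if P == 0 or Q == len(A) - 1:
--         return True
--     if A[P - 1] < A[P] and A[Q] > A[Q+1]: # for hill
--         return True
--     if A[P - 1] > A[P] and A[Q] < A[Q+1]: # for valley
--         return True
--     return False
--
-- def count_castles(A):
--     n = len(A)
--     if n <= 1:
--         return n
--     result = 0
--     i = 0
--
--     while i < n:
--         start = i
--         while i < n - 1 and A[i] == A[i + 1]:
--             i += 1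
--         end = i
--
--         if is_hill_or_valley(start, end, A):
--             result += 1
--
--         i += 1
--
--     return result
-- ===== SOURCE B (Python) =====
-- def count_castles(A):
--     # Compress A into its list of distinct consecutive values, then judge each
--     # run by its compressed neighbours: first and last run always count,
--     # an interior run counts when it is a hill or a valley.
--     V = []
--     for x in A:
--         if not V or V[-1] != x:
--             V.append(x)
--     if not V:
--         return 0
--     if len(V) == 1:
--         return 1
--     return 2 + sum(1 for a, b, c in zip(V, V[1:], V[2:]) if a < b > c or a > b < c)
-- ===== Notes on version B (the rewrite author's own statement) =====
-- stated objective: simpler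
-- what changed: A walks the array with one indexed while-loop containing a nested equal-skipping inner loop plus boundary-index checks via a helper; B instead compresses A into its list of distinct consecutive values in one pass and then judges each compressed entry against its compressed-list neighbours (first and last always count, interior ones when they form a hill or valley), with no index arithmetic at all.
import Mathlib
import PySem

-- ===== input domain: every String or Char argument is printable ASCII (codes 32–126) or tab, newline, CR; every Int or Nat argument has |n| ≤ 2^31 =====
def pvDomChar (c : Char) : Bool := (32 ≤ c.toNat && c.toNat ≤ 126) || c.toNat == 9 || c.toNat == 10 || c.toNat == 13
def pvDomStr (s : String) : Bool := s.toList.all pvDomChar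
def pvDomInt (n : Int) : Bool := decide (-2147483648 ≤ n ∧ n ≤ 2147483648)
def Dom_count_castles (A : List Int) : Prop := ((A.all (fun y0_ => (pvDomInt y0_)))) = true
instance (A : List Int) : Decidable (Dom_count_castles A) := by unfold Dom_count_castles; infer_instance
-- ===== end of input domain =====

-- B replaces A's indexed loop with nested equal-skipping by a run-compression pass followed by a
-- neighbour check on the compressed list; objective: simpler. Same return value everywhere (both total).

-- ===== PORT A =====
-- every index A's code reads lies in range, so 'pyGetD … 0' is exact (the default is never taken)
def aGet (A : List Int) (i : Int) : Int := PySem.List.pyGetD A i 0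

def is_hill_or_valley (P Q : Int) (A : List Int) : Bool :=
  if P = 0 ∨ Q = (A.length : Int) - 1 then true
  else if aGet A (P - 1) < aGet A P ∧ aGet A Q > aGet A (Q + 1) then true
  else if aGet A (P - 1) > aGet A P ∧ aGet A Q < aGet A (Q + 1) then true
  else false

-- the inner 'while i < n - 1 and A[i] == A[i+1]: i += 1' loop (fuel = list length suffices)
def innerLoop (A : List Int) (n : Int) : Int → Nat → Int
  | i, 0 => i
  | i, fuel + 1 =>
    if i < n - 1 ∧ aGet A i = aGet A (i + 1) then innerLoop A n (i + 1) fuel else i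

-- the outer 'while i < n' loop (fuel = list length + 1 suffices: i grows by ≥ 1 per iteration)
def outerLoop (A : List Int) (n : Int) : Int → Int → Nat → Int
  | _, result, 0 => result
  | i, result, fuel + 1 =>
    if i < n then
      let start := i
      let e := innerLoop A n i A.length
      let result' := if is_hill_or_valley start e A then result + 1 else result
      outerLoop A n (e + 1) result' fuel
    else result

def count_castles (A : List Int) : Int :=
  let n : Int := A.length
  if n ≤ 1 then n
  else outerLoop A n 0 0 (A.length + 1)

-- ===== PORT B =====
-- step of B's compression loop: append x when V is empty or its last entry differs from x
def bStep (V : List Int) (x : Int) : List Int :=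
  if V = [] ∨ V.getLast? ≠ some x then V ++ [x] else V

def count_castles_alt (A : List Int) : Int :=
  let V := A.foldl bStep []
  if V = [] then 0
  else if V.length = 1 then 1
  else 2 + (((V.zip (V.drop 1)).zip (V.drop 2)).foldl
      (fun acc t =>
        if (t.1.1 < t.1.2 ∧ t.1.2 > t.2) ∨ (t.1.1 > t.1.2 ∧ t.1.2 < t.2) then acc + 1 else acc) 0)

-- ===== PRECONDITION & SPEC =====
def Spec_count_castles (A : List Int) (out : Int) : Prop := out = count_castles_alt A
instance (A : List Int) (out : Int) : Decidable (Spec_count_castles A out) := by unfold Spec_count_castles; infer_instance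

-- ===== CLAIM (what is proved, stated in full; the proofs are below) =====
def Claim_equal_count_castles : Prop := ∀ (A : List Int), Dom_count_castles A → Spec_count_castles A (count_castles A)

-- ===== LEMMAS AND PROOFS =====

-- length of the first run of equal values
def runLen : List Int → Nat
  | [] => 0
  | [_] => 1
  | x :: y :: t => if x = y then runLen (y :: t) + 1 else 1

-- distinct consecutive values, given the previous kept value
def runsFrom (prev : Int) : List Int → List Int
  | [] => []
  | x :: t => if x = prev then runsFrom prev t else x :: runsFrom x t

def runs : List Int → List Int
  | [] => []
  | x :: t => x :: runsFrom x t

-- how many runs after the first one count: the last always, interior ones when hill/valley w.r.t. prev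
def tailCount (prev : Int) : List Int → Int
  | [] => 0
  | [_] => 1
  | b :: c :: t =>
    (if (prev < b ∧ b > c) ∨ (prev > b ∧ b < c) then 1 else 0) + tailCount b (c :: t)

def castles (A : List Int) : Int :=
  match runs A with
  | [] => 0
  | b :: t => 1 + tailCount b t

-- interior triple count, seeded with the two previous compressed values
def triCount (a b : Int) : List Int → Int
  | [] => 0
  | c :: t => (if (a < b ∧ b > c) ∨ (a > b ∧ b < c) then 1 else 0) + triCount b c t

lemma runLen_pos (x : Int) (t : List Int) : 1 ≤ runLen (x :: t) := by
  cases t with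
  | nil => simp [runLen]
  | cons y s => simp only [runLen]; split <;> omega

lemma runLen_le_length (L : List Int) : runLen L ≤ L.length := by
  induction L with
  | nil => simp [runLen]
  | cons x t ih =>
    cases t with
    | nil => simp [runLen]
    | cons y s => simp only [runLen]; split <;> simp_all

lemma getD_lt_runLen (x : Int) (t : List Int) (k : Nat) (hk : k < runLen (x :: t)) :
    (x :: t).getD k 0 = x := by
  induction t generalizing x k with
  | nil =>
    simp only [runLen] at hk
    have : k = 0 := by omega
    subst this; rfl
  | cons y s ih =>
    simp only [runLen] at hk
    by_cases hxy : x = y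
    · simp only [if_pos hxy] at hk
      cases k with
      | zero => rfl
      | succ k' => subst hxy; simpa using ih x k' (by omega)
    · simp only [if_neg hxy] at hk
      have : k = 0 := by omega
      subst this; rfl

lemma runsFrom_drop (l : Int) (ls : List Int) :
    runsFrom l ls = runs ((l :: ls).drop (runLen (l :: ls))) := by
  induction ls generalizing l with
  | nil => simp [runsFrom, runLen, runs]
  | cons y t ih =>
    simp only [runsFrom, runLen]
    by_cases h : l = y
    · subst h
      simpa using ih l
    · simp [if_neg h, Ne.symm h, runs]

lemma aGet_append (pre L : List Int) (k : Nat) :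
    aGet (pre ++ L) ((pre.length : Int) + k) = L.getD k 0 := by
  unfold aGet
  rw [show ((pre.length : Int) + k) = ((pre.length + k : Nat) : Int) by push_cast; ring,
      PySem.List.pyGetD_natCast]
  simp [List.getD, List.getElem?_append_right]

lemma aGet_last (pre L : List Int) (h : pre ≠ []) :
    aGet (pre ++ L) ((pre.length : Int) - 1) = pre.getLastD 0 := by
  obtain ⟨p, v, rfl⟩ : ∃ p v, pre = p ++ [v] := by
    rcases List.eq_nil_or_concat pre with h' | ⟨p, v, h'⟩
    · exact absurd h' h
    · exact ⟨p, v, by simpa using h'⟩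
  have : ((p ++ [v]).length : Int) - 1 = ((p.length : Int) + (0 : Nat)) := by
    simp only [List.length_append, List.length_singleton]; push_cast; ring
  rw [this, List.append_assoc, aGet_append]
  simp

lemma inner_spec (ls : List Int) : ∀ (x : Int) (pre : List Int) (fuel : Nat),
    (x :: ls).length ≤ fuel →
    innerLoop (pre ++ x :: ls) ((pre ++ x :: ls).length : Int) (pre.length) fuel
      = (pre.length : Int) + runLen (x :: ls) - 1 := by
  induction ls with
  | nil =>
    intro x pre fuel hf
    match fuel, hf with
    | fuel + 1, _ =>
      simp only [innerLoop, runLen]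
      rw [if_neg (by
        rintro ⟨h1, -⟩
        simp only [List.length_append, List.length_cons, List.length_nil] at h1
        omega)]
      omega
  | cons y t ih =>
    intro x pre fuel hf
    match fuel, hf with
    | fuel + 1, hf =>
      simp only [innerLoop]
      have hx : aGet (pre ++ x :: y :: t) (pre.length) = x := by
        simpa using aGet_append pre (x :: y :: t) 0
      have hy : aGet (pre ++ x :: y :: t) ((pre.length : Int) + 1) = y := by
        simpa using aGet_append pre (x :: y :: t) 1
      by_cases hxy : x = y
      · rw [if_pos]
        · have := ih y (pre ++ [x]) fuel (by simp at hf ⊢; omega)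
          rw [List.append_assoc] at this
          simp only [List.singleton_append] at this
          have hlen : ((pre ++ [x]).length : Int) = (pre.length : Int) + 1 := by
            simp only [List.length_append, List.length_singleton]; push_cast; ring
          rw [hlen] at this
          rw [this]
          simp only [runLen, if_pos hxy]
          push_cast; ring
        · constructor
          · simp; omega
          · rw [hx, hy]; exact hxy
      · rw [if_neg]
        · simp only [runLen, if_neg hxy]; omega
        · rintro ⟨-, h2⟩; rw [hx, hy] at h2; exact hxy h2

lemma take_getLastD (x : Int) (ls : List Int) :
    ((x :: ls).take (runLen (x :: ls))).getLastD 0 = x := by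
  have h1 : 1 ≤ runLen (x :: ls) := runLen_pos x ls
  have h2 : runLen (x :: ls) ≤ (x :: ls).length := runLen_le_length _
  rw [List.getLastD_eq_getLast?, List.getLast?_eq_getElem?]
  have hlen : ((x :: ls).take (runLen (x :: ls))).length = runLen (x :: ls) := by
    rw [List.length_take]; omega
  rw [hlen, List.getElem?_take, if_pos (by omega)]
  have := getD_lt_runLen x ls (runLen (x :: ls) - 1) (by omega)
  simpa [List.getD] using this

lemma runs_cons_drop (x : Int) (ls : List Int) :
    runs (x :: ls) = x :: runs ((x :: ls).drop (runLen (x :: ls))) := by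
  have h : runs (x :: ls) = x :: runsFrom x ls := rfl
  rw [h, runsFrom_drop]

lemma outer_spec : ∀ (fuel : Nat) (L pre : List Int) (r : Int), pre ≠ [] →
    L.length + 1 ≤ fuel →
    outerLoop (pre ++ L) ((pre ++ L).length : Int) (pre.length) r fuel
      = r + tailCount (pre.getLastD 0) (runs L) := by
  intro fuel
  induction fuel with
  | zero => intro L pre r _ hf; omega
  | succ fuel ih =>
    intro L pre r hpre hf
    cases L with
    | nil =>
      simp only [outerLoop]
      rw [if_neg (by simp)]
      simp [runs, tailCount]
    | cons x ls =>
      simp only [outerLoop]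
      rw [if_pos (by simp only [List.length_append, List.length_cons]; push_cast; omega)]
      have hRL1 : 1 ≤ runLen (x :: ls) := runLen_pos x ls
      have hRLle : runLen (x :: ls) ≤ ls.length + 1 := by
        simpa using runLen_le_length (x :: ls)
      have hinner := inner_spec ls x pre ((pre ++ x :: ls).length) (by simp)
      rw [hinner]
      have hsplit : (pre ++ (x :: ls).take (runLen (x :: ls))) ++ (x :: ls).drop (runLen (x :: ls))
          = pre ++ x :: ls := by
        rw [List.append_assoc, List.take_append_drop]
      have hlenpre' : (pre ++ (x :: ls).take (runLen (x :: ls))).length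
          = pre.length + runLen (x :: ls) := by
        rw [List.length_append, List.length_take]
        simp only [List.length_cons]
        omega
      have hdroplen : ((x :: ls).drop (runLen (x :: ls))).length = ls.length + 1 - runLen (x :: ls) := by
        rw [List.length_drop]; simp only [List.length_cons]
      have hrec := ih ((x :: ls).drop (runLen (x :: ls))) (pre ++ (x :: ls).take (runLen (x :: ls)))
        (if is_hill_or_valley (pre.length) ((pre.length : Int) + runLen (x :: ls) - 1) (pre ++ x :: ls) = true
          then r + 1 else r)
        (by simp [hpre])
        (by
          rw [hdroplen]
          simp only [List.length_cons] at hf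
          omega)
      rw [hsplit, hlenpre'] at hrec
      have harith : ((pre.length : Int)) + runLen (x :: ls) - 1 + 1
          = ((pre.length + runLen (x :: ls) : Nat) : Int) := by push_cast; ring
      rw [harith, hrec]
      -- last element of the extended prefix is x
      have htake_ne : (x :: ls).take (runLen (x :: ls)) ≠ [] := by
        intro hemp
        have := congrArg List.length hemp
        rw [List.length_take] at this
        simp only [List.length_cons, List.length_nil] at this
        omega
      have hlast' : (pre ++ (x :: ls).take (runLen (x :: ls))).getLastD 0 = x := by
        rw [List.getLastD_eq_getLast?, List.getLast?_append_of_ne_nil _ htake_ne,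
            ← List.getLastD_eq_getLast?]
        exact take_getLastD x ls
      rw [hlast']
      rw [runs_cons_drop x ls]
      -- values A reads at the boundary indices
      have hxval : aGet (pre ++ x :: ls) (pre.length) = x := by
        simpa using aGet_append pre (x :: ls) 0
      have heval : aGet (pre ++ x :: ls) ((pre.length : Int) + runLen (x :: ls) - 1) = x := by
        have h1 : ((pre.length : Int) + runLen (x :: ls) - 1)
            = ((pre.length : Int) + ((runLen (x :: ls) - 1 : Nat) : Int)) := by omega
        rw [h1, aGet_append]
        exact getD_lt_runLen x ls (runLen (x :: ls) - 1) (by omega)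
      have hprev : aGet (pre ++ x :: ls) ((pre.length : Int) - 1) = pre.getLastD 0 :=
        aGet_last pre (x :: ls) hpre
      have hP0 : ((pre.length : Int)) ≠ 0 := by
        have : pre.length ≠ 0 := by simpa using hpre
        omega
      cases hdrop : (x :: ls).drop (runLen (x :: ls)) with
      | nil =>
        -- the run reaches the end of the list: end index = n - 1, the run counts
        have hRLfull : runLen (x :: ls) = ls.length + 1 := by
          have := congrArg List.length hdrop
          rw [hdroplen] at this
          simp only [List.length_nil] at this
          omega
        have hQ : ((pre.length : Int) + runLen (x :: ls) - 1) = ((pre ++ x :: ls).length : Int) - 1 := by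
          simp only [List.length_append, List.length_cons]
          push_cast
          omega
        rw [is_hill_or_valley, if_pos (Or.inr hQ)]
        simp [runs, tailCount]
      | cons c t' =>
        have hlt : runLen (x :: ls) < ls.length + 1 := by
          have := congrArg List.length hdrop
          rw [hdroplen] at this
          simp only [List.length_cons] at this
          omega
        have hQne : ¬((pre.length : Int) + runLen (x :: ls) - 1 = ((pre ++ x :: ls).length : Int) - 1) := by
          simp only [List.length_append, List.length_cons]
          push_cast
          omega
        have hcval : aGet (pre ++ x :: ls) ((pre.length : Int) + runLen (x :: ls) - 1 + 1) = c := by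
          rw [harith]
          have h1 : ((pre.length + runLen (x :: ls) : Nat) : Int)
              = ((pre.length : Int) + (runLen (x :: ls) : Nat)) := by push_cast; ring
          rw [h1, aGet_append]
          have h2 : (x :: ls).getD (runLen (x :: ls)) 0 = ((x :: ls).drop (runLen (x :: ls))).getD 0 0 := by
            simp [List.getD, List.getElem?_drop]
          rw [h2, hdrop]; rfl
        have hhv : (is_hill_or_valley (pre.length) ((pre.length : Int) + runLen (x :: ls) - 1)
              (pre ++ x :: ls) = true)
            ↔ ((pre.getLastD 0 < x ∧ x > c) ∨ (pre.getLastD 0 > x ∧ x < c)) := by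
          rw [is_hill_or_valley, if_neg (by rintro (h | h); exact hP0 h; exact hQne h)]
          rw [hprev, hxval, heval, hcval]
          split_ifs with h1 h2
          · exact iff_of_true rfl (Or.inl h1)
          · exact iff_of_true rfl (Or.inr h2)
          · exact iff_of_false (by simp) (fun h => h.elim h1 h2)
        simp only [runs, tailCount]
        by_cases hcase : (pre.getLastD 0 < x ∧ x > c) ∨ (pre.getLastD 0 > x ∧ x < c)
        · rw [if_pos (hhv.mpr hcase), if_pos hcase]; ring
        · rw [if_neg (fun h => hcase (hhv.mp h)), if_neg hcase]; ring

lemma count_castles_eq_castles (A : List Int) : count_castles A = castles A := by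
  match A with
  | [] => rfl
  | [x] => simp [count_castles, castles, runs, runsFrom, tailCount]
  | x :: y :: t =>
    have h1 : 1 ≤ runLen (x :: y :: t) := runLen_pos _ _
    have h2 : runLen (x :: y :: t) ≤ (x :: y :: t).length := runLen_le_length _
    unfold count_castles
    rw [if_neg (by simp only [List.length_cons]; push_cast; omega)]
    simp only [outerLoop]
    rw [if_pos (by simp only [List.length_cons]; push_cast; omega)]
    have hinner : innerLoop (x :: y :: t) (((x :: y :: t).length : Nat) : Int) 0 ((x :: y :: t).length)
        = ((runLen (x :: y :: t) : Nat) : Int) - 1 := by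
      have := inner_spec (y :: t) x [] ((x :: y :: t).length) (by simp)
      simpa using this
    rw [hinner]
    rw [is_hill_or_valley, if_pos (Or.inl rfl)]
    rw [if_pos rfl]
    have harith : ((runLen (x :: y :: t) : Nat) : Int) - 1 + 1
        = ((runLen (x :: y :: t) : Nat) : Int) := by ring
    rw [harith]
    have htake_ne : (x :: y :: t).take (runLen (x :: y :: t)) ≠ [] := by
      intro hemp
      have := congrArg List.length hemp
      rw [List.length_take] at this
      simp only [List.length_cons, List.length_nil] at this
      omega
    have hsp := outer_spec ((x :: y :: t).length) ((x :: y :: t).drop (runLen (x :: y :: t)))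
      ((x :: y :: t).take (runLen (x :: y :: t))) (0 + 1) htake_ne
      (by rw [List.length_drop]; simp only [List.length_cons] at h2 ⊢; omega)
    rw [List.take_append_drop] at hsp
    have hlen : ((((x :: y :: t).take (runLen (x :: y :: t))).length : Nat) : Int)
        = ((runLen (x :: y :: t) : Nat) : Int) := by
      rw [List.length_take, Nat.min_eq_left h2]
    rw [hlen] at hsp
    rw [hsp, take_getLastD x (y :: t)]
    have hc : castles (x :: y :: t)
        = 1 + tailCount x (runs ((x :: y :: t).drop (runLen (x :: y :: t)))) := by
      unfold castles
      rw [runs_cons_drop x (y :: t)]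
    rw [hc]
    omega

lemma foldl_bStep (L : List Int) : ∀ (acc : List Int), acc ≠ [] →
    L.foldl bStep acc = acc ++ runsFrom (acc.getLastD 0) L := by
  induction L with
  | nil => intro acc _; simp [runsFrom]
  | cons z t ih =>
    intro acc hacc
    obtain ⟨p, v, rfl⟩ : ∃ p v, acc = p ++ [v] := by
      rcases List.eq_nil_or_concat acc with h' | ⟨p, v, h'⟩
      · exact absurd h' hacc
      · exact ⟨p, v, by simpa using h'⟩
    have hlast : (p ++ [v]).getLast? = some v := by simp
    have hlastD : (p ++ [v]).getLastD 0 = v := by simp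
    simp only [List.foldl_cons]
    by_cases hvz : v = z
    · have hstep : bStep (p ++ [v]) z = p ++ [v] := by
        unfold bStep
        rw [if_neg]
        rintro (h | h)
        · simp at h
        · exact h (by rw [hlast, hvz])
      rw [hstep, ih (p ++ [v]) (by simp), hlastD]
      have : runsFrom v (z :: t) = runsFrom v t := by
        show (if z = v then runsFrom v t else z :: runsFrom z t) = runsFrom v t
        rw [if_pos hvz.symm]
      rw [this]
    · have hstep : bStep (p ++ [v]) z = (p ++ [v]) ++ [z] := by
        unfold bStep
        rw [if_pos (Or.inr (by rw [hlast]; exact fun h => hvz (Option.some.inj h)))]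
      rw [hstep, ih ((p ++ [v]) ++ [z]) (by simp)]
      have hzD : ((p ++ [v]) ++ [z]).getLastD 0 = z := by simp
      rw [hzD, hlastD]
      have : runsFrom v (z :: t) = z :: runsFrom z t := by
        show (if z = v then runsFrom v t else z :: runsFrom z t) = z :: runsFrom z t
        rw [if_neg (fun h => hvz h.symm)]
      rw [this]
      simp

lemma foldl_bStep_runs (A : List Int) : A.foldl bStep [] = runs A := by
  cases A with
  | nil => rfl
  | cons z t =>
    have hstep : bStep [] z = [z] := by unfold bStep; rw [if_pos (Or.inl rfl)]; rfl
    simp only [List.foldl_cons, hstep]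
    rw [foldl_bStep t [z] (by simp)]
    rfl

lemma tri_fold (l : List Int) : ∀ (a b : Int) (acc : Int),
    ((((a :: b :: l).zip ((a :: b :: l).drop 1)).zip ((a :: b :: l).drop 2)).foldl
      (fun acc t =>
        if (t.1.1 < t.1.2 ∧ t.1.2 > t.2) ∨ (t.1.1 > t.1.2 ∧ t.1.2 < t.2) then acc + 1 else acc) acc)
      = acc + triCount a b l := by
  induction l with
  | nil => intro a b acc; simp [triCount]
  | cons c t ih =>
    intro a b acc
    simp only [List.drop, List.zip_cons_cons, List.foldl_cons]
    have := ih b c (if (a < b ∧ b > c) ∨ (a > b ∧ b < c) then acc + 1 else acc)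
    simp only [List.drop, List.zip_cons_cons] at this
    rw [this]
    simp only [triCount]
    split_ifs <;> ring

lemma tailCount_tri (l : List Int) : ∀ (a b : Int), tailCount a (b :: l) = 1 + triCount a b l := by
  induction l with
  | nil => intro a b; simp [tailCount, triCount]
  | cons c t ih =>
    intro a b
    simp only [tailCount, triCount]
    rw [ih b c]
    ring

lemma alt_eq_castles (A : List Int) : count_castles_alt A = castles A := by
  unfold count_castles_alt
  rw [foldl_bStep_runs]
  cases hA : runs A with
  | nil =>
    rw [if_pos rfl]
    unfold castles
    rw [hA]
  | cons b t =>
    rw [if_neg (by simp)]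
    have hcast : castles A = 1 + tailCount b t := by
      unfold castles
      rw [hA]
    rw [hcast]
    cases t with
    | nil => simp [tailCount]
    | cons c t' =>
      rw [if_neg (by simp)]
      rw [tri_fold t' b c 0, tailCount_tri t' b c]
      ring

theorem count_castles_spec : Claim_equal_count_castles := by
  intro A _
  unfold Spec_count_castles
  rw [count_castles_eq_castles, alt_eq_castles]
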